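-- pv_equiv track=rewrite | github.com/lvy010/AI-exploration | AI_image/1Prompt1Story/story_generator_demo.py | get_max_window_length
-- ===== SOURCE A (Python) =====
-- from typing import List
--
-- def get_max_window_length(id_prompt: str, frame_prompt_list: List[str]) -> int:
--     """
--     计算最大窗口长度（防止提示词过长）
--
--     Args:
--         id_prompt: 身份提示词
--         frame_prompt_list: 帧提示词列表
--
--     Returns:
--         最大可用窗口长度
--     """
--     combined_prompt = id_prompt
--     max_len = 0
--
--     for prompt in frame_prompt_list:
--         combined_prompt += ' ' + prompt
--         if len(combined_prompt.split()) >= 77:  # 标准token限制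
--             break
--         max_len += 1
--
--     return max_len
-- ===== SOURCE B (Python) =====
-- from typing import List
--
-- def get_max_window_length(id_prompt: str, frame_prompt_list: List[str]) -> int:
--     # Word counts are additive over ' '-joined concatenation, so keep a
--     # running budget instead of re-splitting the whole combined string.
--     remaining = 77 - len(id_prompt.split())
--     n = 0
--     for prompt in frame_prompt_list:
--         remaining -= len(prompt.split())
--         if remaining <= 0:
--             return n
--         n += 1
--     return n
-- ===== Notes on version B (the rewrite author's own statement) =====
-- stated objective: faster
-- what changed: B keeps a running word-count budget (word counts are additive across space-joined strings) instead of rebuilding and re-splitting the whole combined string on every iteration.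
import Mathlib
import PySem

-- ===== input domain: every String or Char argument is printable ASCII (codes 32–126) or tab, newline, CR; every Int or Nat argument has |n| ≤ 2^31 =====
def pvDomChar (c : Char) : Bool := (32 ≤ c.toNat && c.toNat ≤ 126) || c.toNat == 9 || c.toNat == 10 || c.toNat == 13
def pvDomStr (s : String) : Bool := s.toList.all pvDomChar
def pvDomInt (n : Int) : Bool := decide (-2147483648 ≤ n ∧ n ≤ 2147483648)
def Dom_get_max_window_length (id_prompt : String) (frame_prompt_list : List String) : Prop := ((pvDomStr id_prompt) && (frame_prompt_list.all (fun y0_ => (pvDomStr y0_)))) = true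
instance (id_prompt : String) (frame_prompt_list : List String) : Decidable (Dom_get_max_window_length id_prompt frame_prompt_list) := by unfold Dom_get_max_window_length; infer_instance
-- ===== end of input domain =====

-- B replaces A's rebuild-and-resplit of the growing combined string by a running
-- word-count budget (word counts are additive over ' '-joined concatenation): O(L) vs O(n·L).

-- ===== PORT A =====
-- the for-loop with break, carrying the growing combined string
def pvGoA (combined : String) (maxLen : Int) : List String → Int
  | [] => maxLen
  | p :: rest =>
    let combined' := combined ++ " " ++ p
    if 77 ≤ (PySem.Str.split₀ combined').length then maxLen
    else pvGoA combined' (maxLen + 1) rest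

def get_max_window_length (id_prompt : String) (frame_prompt_list : List String) : Int :=
  pvGoA id_prompt 0 frame_prompt_list

-- ===== PORT B =====
-- the budget loop of Source B
def pvGoB (remaining n : Int) : List String → Int
  | [] => n
  | p :: rest =>
    let r := remaining - (PySem.Str.split₀ p).length
    if r ≤ 0 then n else pvGoB r (n + 1) rest

def get_max_window_length_alt (id_prompt : String) (frame_prompt_list : List String) : Int :=
  pvGoB (77 - (PySem.Str.split₀ id_prompt).length) 0 frame_prompt_list

-- ===== PRECONDITION & SPEC =====
def Spec_get_max_window_length (id_prompt : String) (frame_prompt_list : List String) (out : Int) : Prop := out = get_max_window_length_alt id_prompt frame_prompt_list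
instance (id_prompt : String) (frame_prompt_list : List String) (out : Int) : Decidable (Spec_get_max_window_length id_prompt frame_prompt_list out) := by unfold Spec_get_max_window_length; infer_instance

-- ===== CLAIM (what is proved, stated in full; the proofs are below) =====
def Claim_equal_get_max_window_length : Prop := ∀ (id_prompt : String) (frame_prompt_list : List String), Dom_get_max_window_length id_prompt frame_prompt_list → Spec_get_max_window_length id_prompt frame_prompt_list (get_max_window_length id_prompt frame_prompt_list)

-- ===== LEMMAS AND PROOFS =====

-- word count of a character list with an "inside a word" flag
def pvNW : List Char → Bool → Nat
  | [], inw => if inw then 1 else 0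
  | c :: r, inw =>
    if PySem.Chars.isspace c then (if inw then 1 else 0) + pvNW r false
    else pvNW r true

theorem pvGo_length (s : List Char) : ∀ (cur : List Char) (acc : List (List Char)),
    (PySem.Chars.split₀.go s cur acc).length = acc.length + pvNW s (!cur.isEmpty) := by
  induction s with
  | nil =>
    intro cur acc
    cases cur <;> simp [PySem.Chars.split₀.go, pvNW]
  | cons c r ih =>
    intro cur acc
    by_cases hs : PySem.Chars.isspace c
    · cases cur with
      | nil => simp [PySem.Chars.split₀.go, hs, pvNW, ih]
      | cons x xs =>
        simp [PySem.Chars.split₀.go, hs, pvNW, ih]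
        omega
    · simp [PySem.Chars.split₀.go, hs, pvNW, ih]

theorem pvSplit_length (s : List Char) :
    (PySem.Chars.split₀ s).length = pvNW s false := by
  simpa using pvGo_length s [] []

theorem pvNW_append_space (a b : List Char) (inw : Bool) :
    pvNW (a ++ ' ' :: b) inw = pvNW a inw + pvNW b false := by
  induction a generalizing inw with
  | nil =>
    have hsp : PySem.Chars.isspace ' ' = true := by decide
    cases inw <;> simp [pvNW, hsp]
  | cons c r ih =>
    by_cases hs : PySem.Chars.isspace c
    · simp [pvNW, hs, ih]; omega
    · simp [pvNW, hs, ih]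

theorem pvWC_append (a b : String) :
    (PySem.Str.split₀ (a ++ " " ++ b)).length =
      (PySem.Str.split₀ a).length + (PySem.Str.split₀ b).length := by
  simp [PySem.Str.split₀, pvSplit_length]
  rw [pvNW_append_space]

theorem pvGoA_eq_goB (rest : List String) :
    ∀ (combined : String) (maxLen : Int),
      pvGoA combined maxLen rest =
        pvGoB (77 - (PySem.Str.split₀ combined).length) maxLen rest := by
  induction rest with
  | nil => intro combined maxLen; rfl
  | cons p r ih =>
    intro combined maxLen
    have hwc := pvWC_append combined p
    simp only [pvGoA, pvGoB, hwc]
    by_cases h : 77 ≤ ((PySem.Str.split₀ combined).length + (PySem.Str.split₀ p).length)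
    · have h' : (77 : Int) - (PySem.Str.split₀ combined).length - (PySem.Str.split₀ p).length ≤ 0 := by
        omega
      rw [if_pos h, if_pos h']
    · have h' : ¬ ((77 : Int) - (PySem.Str.split₀ combined).length - (PySem.Str.split₀ p).length ≤ 0) := by
        push_cast at h ⊢; omega
      rw [if_neg h, if_neg h', ih, hwc]
      congr 1
      push_cast; ring

-- ===== VERDICT (by name: the statement is the Claim_ definition above) =====
theorem get_max_window_length_spec : Claim_equal_get_max_window_length := by
  intro id_prompt fpl _
  unfold Spec_get_max_window_length get_max_window_length get_max_window_length_alt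
  exact pvGoA_eq_goB fpl id_prompt 0
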